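-- pv_equiv track=rewrite | github.com/nestordemeure/judge_evaluator | fit.py | extract_contestants
-- ===== SOURCE A (Python) =====
-- def extract_contestants(contests_data):
--     # Initialize a set to hold all contestant names
--     contestants = set()
--
--     # Collect contestant names from the contests_data
--     for matches in contests_data.values():
--         for match in matches:
--             contestants.add(match['first'])
--             contestants.add(match['second'])
--
--     # Convert the set of contestants to a sorted list
--     contestants = sorted(contestants)
--
--     # Step 2: Create a mapping from contestant names to indices
--     contestant_index = {name: i for i, name in enumerate(contestants)}
--     return contestant_index
-- ===== SOURCE B (Python) =====
-- def extract_contestants(contests_data):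
--     # Maintain a sorted, duplicate-free list of names by inserting each name at
--     # its position as it is encountered (online insertion, no set and no sort),
--     # then number the list with a growing dict.
--     ordered = []
--     for matches in contests_data.values():
--         for match in matches:
--             for name in (match['first'], match['second']):
--                 lo = 0
--                 while lo < len(ordered) and ordered[lo] < name:
--                     lo += 1
--                 if lo == len(ordered) or ordered[lo] != name:
--                     ordered.insert(lo, name)
--
--     contestant_index = {}
--     for name in ordered:
--         contestant_index[name] = len(contestant_index)
--     return contestant_index
-- ===== Notes on version B (the rewrite author's own statement) =====
-- stated objective: alternative
-- what changed: Replaces set-dedup + batch sort + enumerate comprehension by online maintenance of a sorted duplicate-free list (each name is inserted at its scanned position or skipped if already present), then numbering that list with a dict grown by len().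
import Mathlib
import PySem

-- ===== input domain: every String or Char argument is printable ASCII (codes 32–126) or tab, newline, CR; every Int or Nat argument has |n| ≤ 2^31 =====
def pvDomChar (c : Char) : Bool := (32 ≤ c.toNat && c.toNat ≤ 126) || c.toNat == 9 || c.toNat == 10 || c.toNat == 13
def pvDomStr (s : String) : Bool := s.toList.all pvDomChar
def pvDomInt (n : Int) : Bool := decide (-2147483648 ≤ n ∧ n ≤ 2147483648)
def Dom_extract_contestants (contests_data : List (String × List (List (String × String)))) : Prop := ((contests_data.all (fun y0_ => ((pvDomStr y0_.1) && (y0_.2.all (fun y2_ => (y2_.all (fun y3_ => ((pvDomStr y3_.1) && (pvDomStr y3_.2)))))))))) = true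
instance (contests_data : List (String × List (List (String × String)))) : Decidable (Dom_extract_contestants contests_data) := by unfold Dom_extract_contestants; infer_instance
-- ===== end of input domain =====

-- B maintains a sorted duplicate-free name list online (scan-and-insert per name,
-- no set and no sort call) and numbers it with a dict grown by its own length
-- (objective: alternative; same result, no speed claim).

-- ===== PORT A =====
def extract_contestants (contests_data : List (String × List (List (String × String)))) : List (String × Int) :=
  let contestants : PySem.Set String :=
    contests_data.foldl (fun s p =>
      p.2.foldl (fun s m =>
        PySem.Set.add (PySem.Set.add s ((PySem.Dict.mk m).getD "first" ""))
          ((PySem.Dict.mk m).getD "second" "")) s) PySem.Set.empty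
  let sortedC := PySem.List.sorted contestants (fun x => x) false
  ((PySem.List.enumerate sortedC 0).foldl (fun d p => d.insert p.2 p.1) PySem.Dict.empty).items

-- ===== PORT B =====
-- the while-loop scan 'lo = 0; while lo < len(ordered) and ordered[lo] < name: lo += 1'
-- (exact: lo is the number of leading elements < name)
def insPos (ordered : List String) (name : String) : Nat :=
  (ordered.takeWhile (fun x => decide (x < name))).length

-- 'if lo == len(ordered) or ordered[lo] != name: ordered.insert(lo, name)'
def insertStep (ordered : List String) (name : String) : List String :=
  if insPos ordered name = ordered.length ∨ ordered[insPos ordered name]? ≠ some name then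
    PySem.List.insert ordered ((insPos ordered name : Nat) : Int) name
  else ordered

def extract_contestants_alt (contests_data : List (String × List (List (String × String)))) : List (String × Int) :=
  let ordered : List String :=
    contests_data.foldl (fun ord p =>
      p.2.foldl (fun ord m =>
        [(PySem.Dict.mk m).getD "first" "", (PySem.Dict.mk m).getD "second" ""].foldl insertStep ord) ord) []
  (ordered.foldl (fun (d : PySem.Dict String Int) name => d.insert name (d.size : Int))
      PySem.Dict.empty).items

-- ===== PRECONDITION & SPEC =====
-- Pre_ excludes exactly the inputs on which Python A raises KeyError: a match dict missing key "first" or "second".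
def Pre_extract_contestants (contests_data : List (String × List (List (String × String)))) : Prop :=
  ∀ p ∈ contests_data, ∀ m ∈ p.2,
    (PySem.Dict.mk m).contains "first" = true ∧ (PySem.Dict.mk m).contains "second" = true
instance (contests_data : List (String × List (List (String × String)))) : Decidable (Pre_extract_contestants contests_data) := by unfold Pre_extract_contestants; infer_instance

def pvWitness_extract_contestants : (List (String × List (List (String × String)))) :=
  [("c1", [[("first", "alice"), ("second", "bob")], [("first", "bob"), ("second", "carol")]])]

def Spec_extract_contestants (contests_data : List (String × List (List (String × String)))) (out : List (String × Int)) : Prop := out = extract_contestants_alt contests_data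
instance (contests_data : List (String × List (List (String × String)))) (out : List (String × Int)) : Decidable (Spec_extract_contestants contests_data out) := by unfold Spec_extract_contestants; infer_instance

-- ===== CLAIM (what is proved, stated in full; the proofs are below) =====
def Claim_equal_extract_contestants : Prop := ∀ (contests_data : List (String × List (List (String × String)))), Dom_extract_contestants contests_data → Pre_extract_contestants contests_data → Spec_extract_contestants contests_data (extract_contestants contests_data)

-- ===== LEMMAS AND PROOFS =====

-- structural characterization of one scan-and-insert step
def insUniq (name : String) : List String → List String
  | [] => [name]
  | x :: xs => if x < name then x :: insUniq name xs
               else if x = name then x :: xs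
               else name :: x :: xs

lemma insPos_le (ordered : List String) (name : String) : insPos ordered name ≤ ordered.length :=
  (List.takeWhile_sublist _).length_le

lemma insertStep_eq_insUniq (name : String) : ∀ (ordered : List String),
    insertStep ordered name = insUniq name ordered := by
  intro ordered
  induction ordered with
  | nil => simp [insertStep, insPos, insUniq, PySem.List.insert_zero]
  | cons x xs ih =>
    by_cases hlt : x < name
    · have hd : decide (x < name) = true := decide_eq_true hlt
      have hpos : insPos (x :: xs) name = insPos xs name + 1 := by
        unfold insPos
        rw [List.takeWhile_cons, if_pos hd, List.length_cons]
      have hle : insPos xs name ≤ xs.length := insPos_le xs name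
      have hget : (x :: xs)[insPos xs name + 1]? = xs[insPos xs name]? := by simp
      have hR : insUniq name (x :: xs) = x :: insertStep xs name := by
        rw [ih]; simp only [insUniq, if_pos hlt]
      rw [hR]
      unfold insertStep
      rw [hpos]
      by_cases hc : insPos xs name = xs.length ∨ xs[insPos xs name]? ≠ some name
      · have hc' : insPos xs name + 1 = (x :: xs).length ∨
            (x :: xs)[insPos xs name + 1]? ≠ some name := by
          rcases hc with h | h
          · exact Or.inl (by simp [h])
          · exact Or.inr (by rw [hget]; exact h)
        rw [if_pos hc', if_pos hc]
        rw [PySem.List.insert_natCast _ _ _ (by simp; omega),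
            PySem.List.insert_natCast _ _ _ hle]
        simp
      · have hc' : ¬ (insPos xs name + 1 = (x :: xs).length ∨
            (x :: xs)[insPos xs name + 1]? ≠ some name) := by
          rcases not_or.mp hc with ⟨h1, h2⟩
          refine not_or.mpr ⟨?_, ?_⟩
          · simp only [List.length_cons]; omega
          · rw [hget]; exact h2
        rw [if_neg hc', if_neg hc]
    · have hd : decide (x < name) = false := decide_eq_false hlt
      have hpos : insPos (x :: xs) name = 0 := by
        unfold insPos
        rw [List.takeWhile_cons, if_neg (by simp only [hd]; exact Bool.false_ne_true), List.length_nil]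
      by_cases heq : x = name
      · have hc : ¬ (insPos (x :: xs) name = (x :: xs).length ∨
            (x :: xs)[insPos (x :: xs) name]? ≠ some name) := by
          rw [hpos]
          refine not_or.mpr ⟨by simp, ?_⟩
          simp [heq]
        unfold insertStep
        rw [if_neg hc]
        simp only [insUniq, if_neg hlt, if_pos heq]
      · have hc : insPos (x :: xs) name = (x :: xs).length ∨
            (x :: xs)[insPos (x :: xs) name]? ≠ some name := by
          rw [hpos]
          exact Or.inr (by simp [heq])
        unfold insertStep
        rw [if_pos hc, hpos, show ((0 : Nat) : Int) = 0 from rfl, PySem.List.insert_zero]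
        simp only [insUniq, if_neg hlt, if_neg heq]

lemma mem_insUniq (name y : String) : ∀ (ordered : List String),
    y ∈ insUniq name ordered ↔ y = name ∨ y ∈ ordered := by
  intro ordered
  induction ordered with
  | nil => simp [insUniq]
  | cons x xs ih =>
    by_cases hlt : x < name
    · simp only [insUniq, if_pos hlt, List.mem_cons, ih]
      tauto
    · by_cases heq : x = name
      · subst heq
        rw [show insUniq x (x :: xs) = x :: xs by simp [insUniq]]
        simp only [List.mem_cons]
        tauto
      · simp only [insUniq, if_neg hlt, if_neg heq, List.mem_cons]

lemma pairwise_insUniq (name : String) : ∀ (ordered : List String),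
    ordered.Pairwise (· < ·) → (insUniq name ordered).Pairwise (· < ·) := by
  intro ordered
  induction ordered with
  | nil => intro _; simp [insUniq]
  | cons x xs ih =>
    intro hp
    have hx : ∀ z ∈ xs, x < z := (List.pairwise_cons.mp hp).1
    have hxs := (List.pairwise_cons.mp hp).2
    by_cases hlt : x < name
    · simp only [insUniq, if_pos hlt]
      refine List.pairwise_cons.mpr ⟨?_, ih hxs⟩
      intro z hz
      rcases (mem_insUniq name z xs).mp hz with rfl | hz'
      · exact hlt
      · exact hx z hz'
    · by_cases heq : x = name
      · simpa [insUniq, hlt, heq] using hp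
      · have hnx : name < x := lt_of_le_of_ne (le_of_not_gt hlt) (Ne.symm heq)
        simp only [insUniq, if_neg hlt, if_neg heq]
        refine List.pairwise_cons.mpr ⟨?_, hp⟩
        intro z hz
        rcases List.mem_cons.mp hz with rfl | hz'
        · exact hnx
        · exact lt_trans hnx (hx z hz')

lemma foldl_insUniq_pairwise (ns : List String) : ∀ (ordered : List String),
    ordered.Pairwise (· < ·) →
    (ns.foldl (fun o n => insUniq n o) ordered).Pairwise (· < ·) := by
  induction ns with
  | nil => intro o h; simpa using h
  | cons n ns ih => intro o h; exact ih _ (pairwise_insUniq n o h)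

lemma mem_foldl_insUniq (ns : List String) : ∀ (ordered : List String) (y : String),
    y ∈ ns.foldl (fun o n => insUniq n o) ordered ↔ y ∈ ordered ∨ y ∈ ns := by
  induction ns with
  | nil => simp
  | cons n ns ih =>
    intro o y
    simp only [List.foldl_cons, ih, mem_insUniq, List.mem_cons]
    tauto

-- collapse B's nested loops to one fold over the flattened name list
lemma foldl_insertStep_flat (ms : List (List (String × String))) : ∀ (ord : List String),
    ms.foldl (fun ord m =>
        [(PySem.Dict.mk m).getD "first" "", (PySem.Dict.mk m).getD "second" ""].foldl insertStep ord) ord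
    = (ms.flatMap (fun m => [(PySem.Dict.mk m).getD "first" "", (PySem.Dict.mk m).getD "second" ""])).foldl insertStep ord := by
  induction ms with
  | nil => intro ord; simp
  | cons m ms ih =>
    intro ord
    rw [List.foldl_cons, ih, List.flatMap_cons, List.foldl_append]

lemma outer_insertStep_flat (cd : List (String × List (List (String × String)))) : ∀ (ord : List String),
    cd.foldl (fun ord p =>
        p.2.foldl (fun ord m =>
          [(PySem.Dict.mk m).getD "first" "", (PySem.Dict.mk m).getD "second" ""].foldl insertStep ord) ord) ord
    = (cd.flatMap (fun p => p.2.flatMap (fun m =>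
        [(PySem.Dict.mk m).getD "first" "", (PySem.Dict.mk m).getD "second" ""]))).foldl insertStep ord := by
  induction cd with
  | nil => intro ord; simp
  | cons p cd ih =>
    intro ord
    rw [List.foldl_cons, foldl_insertStep_flat p.2 ord, ih, List.flatMap_cons,
        List.foldl_append]

-- A's acc-append collection is the same flattened list
lemma inner_names (ms : List (List (String × String))) : ∀ (acc : List String),
    ms.foldl (fun s m =>
        PySem.Set.add (PySem.Set.add s ((PySem.Dict.mk m).getD "first" ""))
          ((PySem.Dict.mk m).getD "second" "")) (PySem.Set.ofList acc)
    = PySem.Set.ofList (acc ++ ms.flatMap (fun m =>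
        [(PySem.Dict.mk m).getD "first" "", (PySem.Dict.mk m).getD "second" ""])) := by
  induction ms with
  | nil => intro acc; simp
  | cons m ms ih =>
    intro acc
    simp only [List.foldl_cons, List.flatMap_cons]
    rw [show PySem.Set.add (PySem.Set.add (PySem.Set.ofList acc) ((PySem.Dict.mk m).getD "first" ""))
          ((PySem.Dict.mk m).getD "second" "")
        = PySem.Set.ofList (acc ++ [(PySem.Dict.mk m).getD "first" "", (PySem.Dict.mk m).getD "second" ""]) by
      simp [PySem.Set.ofList_eq_foldl, List.foldl_append]]
    rw [ih]
    simp

lemma outer_names (cd : List (String × List (List (String × String)))) : ∀ (acc : List String),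
    cd.foldl (fun s p =>
        p.2.foldl (fun s m =>
          PySem.Set.add (PySem.Set.add s ((PySem.Dict.mk m).getD "first" ""))
            ((PySem.Dict.mk m).getD "second" "")) s) (PySem.Set.ofList acc)
    = PySem.Set.ofList (acc ++ cd.flatMap (fun p => p.2.flatMap (fun m =>
        [(PySem.Dict.mk m).getD "first" "", (PySem.Dict.mk m).getD "second" ""]))) := by
  induction cd with
  | nil => intro acc; simp
  | cons p cd ih =>
    intro acc
    simp only [List.foldl_cons, List.flatMap_cons]
    rw [inner_names p.2 acc, ih]
    simp

-- B's numbering loop: over fresh distinct keys it appends swapped-enumerate pairs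
lemma loopIdx (t : List String) : ∀ (d : PySem.Dict String Int),
    (∀ y ∈ t, d.contains y = false) → t.Nodup →
    (t.foldl (fun (d : PySem.Dict String Int) name => d.insert name (d.size : Int)) d).items
    = d.items ++ (PySem.List.enumerate t (d.size : Int)).map (fun p => (p.2, p.1)) := by
  induction t with
  | nil => intro d _ _; simp [PySem.List.enumerate]
  | cons x xs ih =>
    intro d hfresh hnd
    have hxf : d.contains x = false := hfresh x List.mem_cons_self
    have hitems := PySem.Dict.items_insert_of_not_contains d ((d.size : Int)) hxf
    have hfresh' : ∀ y ∈ xs, (d.insert x (d.size : Int)).contains y = false := by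
      intro y hy
      rw [PySem.Dict.contains_insert]
      have h1 : d.contains y = false := hfresh y (List.mem_cons_of_mem _ hy)
      have h2 : y ≠ x := fun h => (List.nodup_cons.mp hnd).1 (h ▸ hy)
      simp [h1, h2]
    simp only [List.foldl_cons]
    rw [ih (d.insert x (d.size : Int)) hfresh' (List.nodup_cons.mp hnd).2]
    have hitems' := hitems
    simp only [PySem.Dict.size] at hitems' ⊢
    have hsz : (d.insert x ((d.items.length : Nat) : Int)).items.length = d.items.length + 1 := by
      rw [hitems']; simp
    rw [hsz, hitems', PySem.List.enumerate_cons]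
    simp

lemma foldl_insertStep_eq_insUniq (l : List String) : ∀ (o : List String),
    l.foldl insertStep o = l.foldl (fun o n => insUniq n o) o := by
  induction l with
  | nil => intro o; rfl
  | cons a l ih =>
    intro o
    rw [List.foldl_cons, List.foldl_cons, insertStep_eq_insUniq a o]
    exact ih _

-- ===== VERDICT (by name: the statement is the Claim_ definition above) =====
theorem extract_contestants_spec : Claim_equal_extract_contestants := by
  intro cd _ _
  show extract_contestants cd = extract_contestants_alt cd
  simp only [extract_contestants, extract_contestants_alt]
  rw [show (PySem.Set.empty : PySem.Set String) = PySem.Set.ofList [] from rfl, outer_names cd []]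
  rw [outer_insertStep_flat cd []]
  set N := cd.flatMap (fun p => p.2.flatMap (fun m =>
      [(PySem.Dict.mk m).getD "first" "", (PySem.Dict.mk m).getD "second" ""])) with hNdef
  simp only [List.nil_append]
  rw [foldl_insertStep_eq_insUniq N []]
  set L := N.foldl (fun o n => insUniq n o) [] with hLdef
  have hlt : L.Pairwise (· < ·) := foldl_insUniq_pairwise N [] (by simp)
  have hnd : L.Nodup := hlt.imp ne_of_lt
  have hmem : ∀ y, y ∈ L ↔ y ∈ N := by
    intro y
    rw [hLdef, mem_foldl_insUniq N [] y]
    simp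
  have hperm : L.Perm (PySem.Set.ofList N) := by
    rw [List.perm_ext_iff_of_nodup hnd (PySem.Set.nodup_ofList N)]
    intro y
    rw [hmem y, PySem.Set.mem_ofList]
  have hsorted : PySem.List.sorted (PySem.Set.ofList N) (fun x => x) false = L :=
    PySem.List.sorted_eq_of_perm_of_pairwise_lt _ _ _ hperm hlt
  rw [hsorted]
  rw [PySem.Dict.items_foldl_insert_fresh (PySem.List.enumerate L 0)
        (fun p => p.2) (fun p => p.1) PySem.Dict.empty
        (fun a _ => PySem.Dict.contains_empty a.2)
        (by rw [PySem.List.map_snd_enumerate]; exact hnd)]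
  rw [loopIdx L PySem.Dict.empty (fun y _ => PySem.Dict.contains_empty y) hnd]
  simp [PySem.Dict.size]
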